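-- pv_equiv track=rewrite | github.com/gotnone/hwa | tools/diabolo/software/utils.py | hexdump
-- ===== SOURCE A (Python) =====
-- def hexdump(address, data):
--     s = ""
--     line = ""
--     oldline = ""
--     for c in data:
--         if address % 16 == 0:
--             line = "\n%08x " % address
--         else:
--             if address % 8 == 0:
--                 # line += ' --'
--                 line += ' '
--
--         line += " %02x" % ord(c)
--         address += 1
--
--         if address % 16 == 0:
--             if line[10:] == oldline[10:]:
--                 if not s.endswith("*"):
--                     s += "\n*"
--             else:
--                 s += line
--                 oldline = line
--     return s[1:]
-- ===== SOURCE B (Python) =====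
-- def hexdump(address, data):
--     # Pass 1: cut data into chunks that each end exactly on a 16-byte
--     # boundary (partial trailing bytes are dropped), rendering one line each.
--     lines = []
--     pos = 0
--     while True:
--         k = 16 - address % 16
--         if len(data) - pos < k:
--             break
--         header = "\n%08x " % address if address % 16 == 0 else ""
--         body = "".join(
--             (" " if (address + i) % 16 != 0 and (address + i) % 8 == 0 else "")
--             + " %02x" % ord(data[pos + i])
--             for i in range(k))
--         lines.append(header + body)
--         pos += k
--         address += k
--     # Pass 2: compress repeated lines (compared from column 10 on) into '*'.
--     s = ""
--     old = ""
--     for line in lines: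
--         if line[10:] == old[10:]:
--             if not s.endswith("*"):
--                 s += "\n*"
--         else:
--             s += line
--             old = line
--     return s[1:]
-- ===== Notes on version B (the rewrite author's own statement) =====
-- stated objective: alternative
-- what changed: A is a single per-character state machine threading address/line/oldline; B is two passes: it first cuts the data into chunks that end exactly on 16-byte boundaries and renders each chunk's line independently, then folds the line list with a separate repeat-compression step.
import Mathlib
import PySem

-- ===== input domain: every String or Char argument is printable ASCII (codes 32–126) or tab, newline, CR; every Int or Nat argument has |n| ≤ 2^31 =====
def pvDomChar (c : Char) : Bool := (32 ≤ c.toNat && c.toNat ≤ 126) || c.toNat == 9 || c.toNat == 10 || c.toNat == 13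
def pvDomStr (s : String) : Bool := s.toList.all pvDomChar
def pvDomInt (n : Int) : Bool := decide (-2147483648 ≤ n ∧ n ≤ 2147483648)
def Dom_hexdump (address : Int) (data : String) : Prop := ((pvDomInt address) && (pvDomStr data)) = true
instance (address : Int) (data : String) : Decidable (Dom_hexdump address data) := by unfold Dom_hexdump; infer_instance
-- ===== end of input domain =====

-- B re-decomposes A's per-character state machine into two passes — cut the data into
-- boundary-aligned chunks rendered independently, then compress repeats — same return values.

-- shared formatting helpers: "%0Nx" % n exactly as CPython ('-', then zero-pad to total width N)
def pvHexPad (w : Nat) (n : Int) : List Char :=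
  if n < 0 then
    let d := Nat.toDigits 16 n.natAbs
    '-' :: (List.replicate (w - 1 - d.length) '0' ++ d)
  else
    let d := Nat.toDigits 16 n.natAbs
    List.replicate (w - d.length) '0' ++ d

-- "\n%08x " % a
def pvHeader (a : Int) : List Char := '\n' :: (pvHexPad 8 a ++ [' '])
-- " %02x" % ord(c)
def pvHex2 (c : Char) : List Char := ' ' :: pvHexPad 2 (c.toNat : Int)

-- ===== PORT A =====
-- loop state (address, s, line, oldline); line[10:] is List.drop 10 (exact: non-negative slice
-- start), s.endswith("*") is getLast? = some '*' (exact for a one-character suffix)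
def hexdumpStep (st : Int × List Char × List Char × List Char) (c : Char) :
    Int × List Char × List Char × List Char :=
  let address := st.1
  let s := st.2.1
  let line0 := st.2.2.1
  let oldline := st.2.2.2
  let line1 := if PySem.Int.mod address 16 = 0 then pvHeader address
    else if PySem.Int.mod address 8 = 0 then line0 ++ [' '] else line0
  let line2 := line1 ++ pvHex2 c
  let address' := address + 1
  if PySem.Int.mod address' 16 = 0 then
    if line2.drop 10 = oldline.drop 10 then
      if s.getLast? = some '*' then (address', s, line2, oldline)
      else (address', s ++ ['\n', '*'], line2, oldline)
    else (address', s ++ line2, line2, line2)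
  else (address', s, line2, oldline)

def hexdump (address : Int) (data : String) : String :=
  String.ofList (((data.toList.foldl hexdumpStep (address, [], [], [])).2.1).drop 1)

-- ===== PORT B =====
-- hex text of one chunk, byte by byte (the '"".join(… for i in range(k))' of Source B)
def pvBody : Int → List Char → List Char
  | _, [] => []
  | a, c :: cs =>
    (if PySem.Int.mod a 16 ≠ 0 ∧ PySem.Int.mod a 8 = 0 then [' '] else [])
      ++ pvHex2 c ++ pvBody (a + 1) cs

def pvLineFor (a : Int) (chunk : List Char) : List Char :=
  (if PySem.Int.mod a 16 = 0 then pvHeader a else []) ++ pvBody a chunk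

-- pass 1: chunks each ending exactly on a 16-byte boundary; a partial tail is dropped
def pvChunks (a : Int) (cs : List Char) : List (List Char) :=
  let k := (16 - PySem.Int.mod a 16).toNat
  if cs.length < k then []
  else pvLineFor a (cs.take k) :: pvChunks (a + k) (cs.drop k)
termination_by cs.length
decreasing_by
  have h := PySem.Int.mod_lt a (b := 16) (by norm_num)
  simp only [List.length_drop]
  omega

-- pass 2: repeat compression, state (s, previous emitted line)
def pvCompressStep (p : List Char × List Char) (line : List Char) : List Char × List Char :=
  if line.drop 10 = p.2.drop 10 then
    if p.1.getLast? = some '*' then p else (p.1 ++ ['\n', '*'], p.2)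
  else (p.1 ++ line, line)

def hexdump_alt (address : Int) (data : String) : String :=
  String.ofList (((pvChunks address data.toList).foldl pvCompressStep ([], [])).1.drop 1)

-- ===== PRECONDITION & SPEC =====
def Spec_hexdump (address : Int) (data : String) (out : String) : Prop := out = hexdump_alt address data
instance (address : Int) (data : String) (out : String) : Decidable (Spec_hexdump address data out) := by unfold Spec_hexdump; infer_instance

-- ===== CLAIM (what is proved, stated in full; the proofs are below) =====
def Claim_equal_hexdump : Prop := ∀ (address : Int) (data : String), Dom_hexdump address data → Spec_hexdump address data (hexdump address data)

-- ===== LEMMAS AND PROOFS =====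

-- running A's loop across the tail of a chunk (start not 16-aligned): it appends pvBody to
-- line and performs exactly one emission step (= pvCompressStep) at the final boundary
lemma run_mid : ∀ (cs : List Char) (a : Int) (s line old : List Char),
    PySem.Int.mod a 16 ≠ 0 →
    (cs.length : Int) = 16 - PySem.Int.mod a 16 →
    List.foldl hexdumpStep (a, s, line, old) cs =
      (a + cs.length,
       (pvCompressStep (s, old) (line ++ pvBody a cs)).1,
       line ++ pvBody a cs,
       (pvCompressStep (s, old) (line ++ pvBody a cs)).2) := by
  intro cs
  induction cs with
  | nil =>
    intro a s line old hm hlen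
    have e16 : PySem.Int.mod a 16 = a % 16 := PySem.Int.mod_eq_emod_of_pos (by norm_num)
    rw [e16] at hm hlen
    simp at hlen
    omega
  | cons c rest ih =>
    intro a s line old hm hlen
    have e16 : PySem.Int.mod a 16 = a % 16 := PySem.Int.mod_eq_emod_of_pos (by norm_num)
    have e8 : PySem.Int.mod a 8 = a % 8 := PySem.Int.mod_eq_emod_of_pos (by norm_num)
    have e16' : PySem.Int.mod (a + 1) 16 = (a + 1) % 16 := PySem.Int.mod_eq_emod_of_pos (by norm_num)
    rw [e16] at hm hlen
    simp only [List.length_cons] at hlen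
    push_cast at hlen
    by_cases hend : (a + 1) % 16 = 0
    · -- last byte of the line: rest = []
      have hrest : rest = [] := by
        have : (rest.length : Int) = 0 := by omega
        simpa using this
      subst hrest
      have hl : ((if PySem.Int.mod a 16 = 0 then pvHeader a
            else if PySem.Int.mod a 8 = 0 then line ++ [' '] else line) ++ pvHex2 c)
          = line ++ pvBody a [c] := by
        simp only [pvBody, List.append_nil]
        rw [if_neg (by rw [e16]; exact hm)]
        by_cases h8 : a % 8 = 0
        · rw [if_pos (by rw [e8]; exact h8),
            if_pos ⟨by rw [e16]; exact hm, by rw [e8]; exact h8⟩]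
          simp [List.append_assoc]
        · rw [if_neg (by rw [e8]; exact h8), if_neg (by simp [h8])]
          simp
      simp only [List.foldl, hexdumpStep]
      rw [hl, if_pos (by rw [e16']; exact hend)]
      simp only [pvCompressStep, List.length_cons, List.length_nil]
      split_ifs <;> simp
    · have hne : (a + 1) % 16 ≠ 0 := hend
      have hstep : List.foldl hexdumpStep ((a, s, line, old)) (c :: rest) =
          List.foldl hexdumpStep
            (a + 1, s,
             (if a % 8 = 0 then line ++ [' '] else line) ++ pvHex2 c, old) rest := by
        simp only [List.foldl, hexdumpStep, e16, e8, if_neg hm, e16', if_neg hne]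
      rw [hstep]
      rw [ih (a + 1) s _ old (by rw [e16']; exact hne) (by rw [e16']; omega)]
      have hbody : line ++ pvBody a (c :: rest) =
          ((if a % 8 = 0 then line ++ [' '] else line) ++ pvHex2 c) ++ pvBody (a + 1) rest := by
        simp only [pvBody, e16, e8, hm, ne_eq, not_false_iff, true_and]
        by_cases h8 : a % 8 = 0 <;> simp [h8, List.append_assoc]
      rw [← hbody]
      have : a + 1 + (rest.length : Int) = a + (((rest.length + 1 : Nat)) : Int) := by omega
      simp only [List.length_cons, this]

-- running A's loop across one whole chunk produces exactly pvLineFor and one pvCompressStep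
lemma run_chunk (cs : List Char) (a : Int) (s line old : List Char)
    (hline : PySem.Int.mod a 16 ≠ 0 → line = [])
    (hlen : (cs.length : Int) = 16 - PySem.Int.mod a 16) :
    List.foldl hexdumpStep (a, s, line, old) cs =
      (a + cs.length,
       (pvCompressStep (s, old) (pvLineFor a cs)).1,
       pvLineFor a cs,
       (pvCompressStep (s, old) (pvLineFor a cs)).2) := by
  have e16 : PySem.Int.mod a 16 = a % 16 := PySem.Int.mod_eq_emod_of_pos (by norm_num)
  by_cases h : PySem.Int.mod a 16 = 0
  · cases cs with
    | nil => rw [h] at hlen; simp at hlen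
    | cons c rest =>
      have ha : a % 16 = 0 := by rw [← e16]; exact h
      have e16' : PySem.Int.mod (a + 1) 16 = (a + 1) % 16 :=
        PySem.Int.mod_eq_emod_of_pos (by norm_num)
      have hne : PySem.Int.mod (a + 1) 16 ≠ 0 := by rw [e16']; omega
      have hstep : List.foldl hexdumpStep (a, s, line, old) (c :: rest) =
          List.foldl hexdumpStep (a + 1, s, pvHeader a ++ pvHex2 c, old) rest := by
        simp only [List.foldl, hexdumpStep, if_pos h, if_neg hne]
      rw [hstep, run_mid rest (a + 1) s _ old hne
        (by rw [e16']; rw [h] at hlen; simp only [List.length_cons] at hlen; push_cast at hlen ⊢; omega)]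
      have hbody : (pvHeader a ++ pvHex2 c) ++ pvBody (a + 1) rest = pvLineFor a (c :: rest) := by
        simp only [pvLineFor, if_pos h, pvBody, List.append_assoc]
        rw [if_neg (by rw [h]; simp)]
        simp
      rw [hbody]
      have : a + 1 + (rest.length : Int) = a + (((rest.length + 1 : Nat)) : Int) := by omega
      simp only [List.length_cons, this]
  · rw [hline h] at *
    rw [run_mid cs a s [] old h hlen]
    simp only [pvLineFor, if_neg h, List.nil_append]

-- a short tail (never reaching a 16-boundary) leaves s and oldline untouched
lemma run_short : ∀ (cs : List Char) (a : Int) (s line old : List Char),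
    (cs.length : Int) < 16 - PySem.Int.mod a 16 →
    ∃ l', List.foldl hexdumpStep (a, s, line, old) cs = (a + cs.length, s, l', old) := by
  intro cs
  induction cs with
  | nil => intro a s line old _; exact ⟨line, by simp⟩
  | cons c rest ih =>
    intro a s line old hlen
    have e16 : PySem.Int.mod a 16 = a % 16 := PySem.Int.mod_eq_emod_of_pos (by norm_num)
    have e16' : PySem.Int.mod (a + 1) 16 = (a + 1) % 16 :=
      PySem.Int.mod_eq_emod_of_pos (by norm_num)
    simp only [List.length_cons] at hlen
    push_cast at hlen
    rw [e16] at hlen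
    have hne : PySem.Int.mod (a + 1) 16 ≠ 0 := by rw [e16']; omega
    have hstep : List.foldl hexdumpStep (a, s, line, old) (c :: rest) =
        List.foldl hexdumpStep
          (a + 1, s,
           (if PySem.Int.mod a 16 = 0 then pvHeader a
            else if PySem.Int.mod a 8 = 0 then line ++ [' '] else line) ++ pvHex2 c, old) rest := by
      simp only [List.foldl, hexdumpStep, if_neg hne]
    obtain ⟨l', hl⟩ := ih (a + 1) s _ old (by rw [e16']; omega)
    refine ⟨l', ?_⟩
    rw [hstep, hl]
    have : a + 1 + (rest.length : Int) = a + (((rest.length + 1 : Nat)) : Int) := by omega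
    simp only [List.length_cons, this]

-- main invariant: A's (s, oldline) pair is B's compression fold over B's chunk list
lemma run_all : ∀ (n : Nat) (cs : List Char), cs.length = n →
    ∀ (a : Int) (s line old : List Char), (PySem.Int.mod a 16 ≠ 0 → line = []) →
    ((List.foldl hexdumpStep (a, s, line, old) cs).2.1,
     (List.foldl hexdumpStep (a, s, line, old) cs).2.2.2) =
      (pvChunks a cs).foldl pvCompressStep (s, old) := by
  intro n
  induction n using Nat.strong_induction_on with
  | _ n ih =>
    intro cs hcs a s line old hline
    have e16 : PySem.Int.mod a 16 = a % 16 := PySem.Int.mod_eq_emod_of_pos (by norm_num)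
    have hmb : 0 ≤ a % 16 ∧ a % 16 < 16 :=
      ⟨Int.emod_nonneg a (by norm_num), Int.emod_lt_of_pos a (by norm_num)⟩
    rw [pvChunks]
    by_cases hlt : cs.length < (16 - PySem.Int.mod a 16).toNat
    · rw [if_pos hlt]
      obtain ⟨l', hl⟩ := run_short cs a s line old (by rw [e16]; rw [e16] at hlt; omega)
      rw [hl]
      rfl
    · rw [if_neg hlt]
      rw [e16] at hlt
      set k := (16 - a % 16).toNat with hk
      have hkle : k ≤ cs.length := by omega
      have htake : ((cs.take k).length : Int) = 16 - PySem.Int.mod a 16 := by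
        rw [e16]; simp [List.length_take, Nat.min_eq_left hkle]; omega
      conv_lhs => rw [← List.take_append_drop k cs, List.foldl_append]
      rw [run_chunk (cs.take k) a s line old hline htake]
      have hmod : PySem.Int.mod (a + ((cs.take k).length : Int)) 16 = 0 := by
        rw [PySem.Int.mod_eq_emod_of_pos (by norm_num)]
        have : ((cs.take k).length : Int) = 16 - a % 16 := by rw [← e16]; exact htake
        omega
      have := ih (cs.drop k).length (by simp [List.length_drop]; omega) (cs.drop k) rfl
        (a + ((cs.take k).length : Int))
        ((pvCompressStep (s, old) (pvLineFor a (cs.take k))).1)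
        (pvLineFor a (cs.take k))
        ((pvCompressStep (s, old) (pvLineFor a (cs.take k))).2)
        (by intro hcontra; exact absurd hmod hcontra)
      rw [this, List.foldl_cons]
      have hlen' : ((cs.take k).length : Int) = (k : Int) := by
        simp [List.length_take, Nat.min_eq_left hkle]
      rw [hlen']
      rw [e16, ← hk]

-- ===== VERDICT (by name: the statement is the Claim_ definition above) =====
theorem hexdump_spec : Claim_equal_hexdump := by
  intro address data _
  unfold Spec_hexdump hexdump hexdump_alt
  have h := run_all data.toList.length data.toList rfl address [] [] [] (by intro _; rfl)
  rw [congrArg Prod.fst h]
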